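-- pv_equiv track=rewrite | github.com/GuillaumeDiamant/NumaBench | bench.py | format_cpu_range
-- ===== SOURCE A (Python) =====
-- def format_cpu_range(cpu_ids):
--     if not cpu_ids:
--         return "Aucun CPU"
--     if len(cpu_ids) == 1:
--         return str(cpu_ids[0])
--     min_cpu = min(cpu_ids)
--     max_cpu = max(cpu_ids)
--     if all(i in cpu_ids for i in range(min_cpu, max_cpu + 1)):
--         return f"{min_cpu}-{max_cpu}"
--     return ",".join(str(i) for i in sorted(cpu_ids))
-- ===== SOURCE B (Python) =====
-- def format_cpu_range(cpu_ids):
--     if not cpu_ids: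
--         return "Aucun CPU"
--     if len(cpu_ids) == 1:
--         return str(cpu_ids[0])
--     ordered = sorted(cpu_ids)
--     if all(b - a <= 1 for a, b in zip(ordered, ordered[1:])):
--         return f"{ordered[0]}-{ordered[-1]}"
--     return ",".join(str(i) for i in ordered)
-- ===== Notes on version B (the rewrite author's own statement) =====
-- stated objective: simpler
-- what changed: Replaces A's min/max computation plus a membership scan over every integer in [min,max] (quadratic in the span times list length) with one sort followed by a single adjacent-difference pass over the sorted list; the endpoints of the range string are read off the sorted list.
import Mathlib
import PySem

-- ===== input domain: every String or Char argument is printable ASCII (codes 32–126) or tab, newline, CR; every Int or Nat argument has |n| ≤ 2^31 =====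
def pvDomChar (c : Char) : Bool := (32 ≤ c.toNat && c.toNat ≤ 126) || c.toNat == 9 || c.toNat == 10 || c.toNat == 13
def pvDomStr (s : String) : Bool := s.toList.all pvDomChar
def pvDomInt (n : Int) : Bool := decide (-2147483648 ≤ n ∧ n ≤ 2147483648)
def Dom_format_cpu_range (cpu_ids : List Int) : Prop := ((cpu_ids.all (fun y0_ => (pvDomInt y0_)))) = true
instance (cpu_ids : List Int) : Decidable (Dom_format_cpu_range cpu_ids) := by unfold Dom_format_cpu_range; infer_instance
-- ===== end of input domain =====

-- B replaces A's membership scan over every integer in [min,max] by one sort and a single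
-- adjacent-difference pass (objective: simpler). Both are total; A = B everywhere.

-- ===== PORT A =====
-- short-circuiting transliteration of `all(i in cpu_ids for i in range(lo, hi))`
-- (Python's generator `all` stops at the first miss)
def pyAllRangeMem (cpu_ids : List Int) (i stop : Int) : Bool :=
  if _h : i < stop then
    if cpu_ids.contains i then pyAllRangeMem cpu_ids (i + 1) stop else false
  else true
termination_by (stop - i).toNat
decreasing_by omega

def format_cpu_range (cpu_ids : List Int) : String :=
  if cpu_ids = [] then "Aucun CPU"
  else if cpu_ids.length = 1 then PySem.Int.toStr (PySem.List.pyGetD cpu_ids 0 0)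
  else
    let min_cpu := (PySem.List.min? cpu_ids (fun x => x)).getD 0  -- list nonempty here, so some
    let max_cpu := (PySem.List.max? cpu_ids (fun x => x)).getD 0
    if pyAllRangeMem cpu_ids min_cpu (max_cpu + 1) then
      String.mk (PySem.Int.toChars min_cpu ++ '-' :: PySem.Int.toChars max_cpu)
    else
      String.mk (PySem.Chars.join [','] ((PySem.List.sorted cpu_ids (fun x => x) false).map PySem.Int.toChars))

-- ===== PORT B =====
def format_cpu_range_alt (cpu_ids : List Int) : String :=
  if cpu_ids = [] then "Aucun CPU"
  else if cpu_ids.length = 1 then PySem.Int.toStr (PySem.List.pyGetD cpu_ids 0 0)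
  else
    let ordered := PySem.List.sorted cpu_ids (fun x => x) false
    if (ordered.zip (ordered.drop 1)).all (fun p => p.2 - p.1 ≤ 1) then
      String.mk (PySem.Int.toChars (PySem.List.pyGetD ordered 0 0) ++ '-' :: PySem.Int.toChars (PySem.List.pyGetD ordered (-1) 0))
    else
      String.mk (PySem.Chars.join [','] (ordered.map PySem.Int.toChars))

-- ===== PRECONDITION & SPEC =====
def Spec_format_cpu_range (cpu_ids : List Int) (out : String) : Prop := out = format_cpu_range_alt cpu_ids
instance (cpu_ids : List Int) (out : String) : Decidable (Spec_format_cpu_range cpu_ids out) := by unfold Spec_format_cpu_range; infer_instance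

-- ===== CLAIM (what is proved, stated in full; the proofs are below) =====
def Claim_equal_format_cpu_range : Prop := ∀ (cpu_ids : List Int), Dom_format_cpu_range cpu_ids → Spec_format_cpu_range cpu_ids (format_cpu_range cpu_ids)

-- ===== LEMMAS AND PROOFS =====

-- On a sorted (≤) nonempty list, "every integer between head and last is a member"
-- is the same as "adjacent elements differ by at most 1".
theorem pv_contig_iff (x : Int) (t : List Int)
    (h : (x :: t).Pairwise (fun p q : Int => p ≤ q)) :
    (∀ i : Int, x ≤ i → i ≤ (x :: t).getLast (by simp) → i ∈ x :: t) ↔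
      List.IsChain (fun a b => b - a ≤ 1) (x :: t) := by
  induction t generalizing x with
  | nil =>
    constructor
    · intro _; simp
    · intro _ i h1 h2
      have h2' : i ≤ x := by simpa using h2
      have : i = x := le_antisymm h2' h1
      simp [this]
  | cons y t ih =>
    have hxy : x ≤ y := (List.pairwise_cons.mp h).1 y (by simp)
    have h' : (y :: t).Pairwise (fun p q : Int => p ≤ q) := (List.pairwise_cons.mp h).2
    have hyL : y ≤ (y :: t).getLast (by simp) := by
      have hm := List.getLast_mem (l := y :: t) (by simp)
      rcases List.mem_cons.mp hm with heq | hmem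
      · exact le_of_eq heq.symm
      · exact (List.pairwise_cons.mp h').1 _ hmem
    have hLeq : (x :: y :: t).getLast (by simp) = (y :: t).getLast (by simp) := by
      simp
    rw [List.isChain_cons_cons, ← ih y h', hLeq]
    constructor
    · intro hall
      constructor
      · by_contra hgt
        push_neg at hgt
        have hx1 : x + 1 ∈ x :: y :: t :=
          hall (x + 1) (by omega) (le_trans (by omega : x + 1 ≤ y) hyL)
        rcases List.mem_cons.mp hx1 with heq | hmem
        · omega
        · have : y ≤ x + 1 := by
            rcases List.mem_cons.mp hmem with rfl | hmem'
            · omega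
            · have := (List.pairwise_cons.mp h').1 _ hmem'
              omega
          omega
      · intro i hi1 hi2
        have hmem : i ∈ x :: y :: t := hall i (le_trans hxy hi1) hi2
        rcases List.mem_cons.mp hmem with rfl | hm2
        · have : i = y := le_antisymm hxy hi1
          rw [this]; simp
        · exact hm2
    · rintro ⟨hd, hall⟩ i hi1 hi2
      by_cases hix : i ≤ x
      · have : i = x := le_antisymm hix hi1
        simp [this]
      · push_neg at hix
        exact List.mem_cons_of_mem x (hall i (by omega) hi2)

-- zip-with-tail "all diffs ≤ 1" is exactly the adjacent chain condition.
theorem pv_zip_all_iff_chain (l : List Int) :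
    ((l.zip (l.drop 1)).all (fun p => p.2 - p.1 ≤ 1) = true) ↔
      List.IsChain (fun a b : Int => b - a ≤ 1) l := by
  induction l with
  | nil => simp
  | cons x t ih =>
    cases t with
    | nil => simp
    | cons y t =>
      simp only [List.drop_succ_cons, List.drop_zero, List.zip_cons_cons, List.all_cons,
        Bool.and_eq_true, decide_eq_true_eq] at ih ⊢
      rw [List.isChain_cons_cons, ← ih]

-- the short-circuiting loop computes the same Bool as `all` over the whole range
theorem pyAllRangeMem_eq (xs : List Int) (a b : Int) :
    pyAllRangeMem xs a b = (PySem.List.pyRange a b 1).all (fun i => xs.contains i) := by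
  by_cases hab : a < b
  · rw [pyAllRangeMem, PySem.List.pyRange_one_cons hab]
    simp only [hab, dif_pos, List.all_cons]
    by_cases hc : xs.contains a = true
    · rw [if_pos hc, hc, Bool.true_and]
      exact pyAllRangeMem_eq xs (a + 1) b
    · simp at hc
      simp [hc]
  · rw [pyAllRangeMem, PySem.List.pyRange_one_eq_nil (by omega)]
    simp [hab]
termination_by (b - a).toNat
decreasing_by omega

-- the head of the sorted list is min's value …
theorem pv_min_head (cpu_ids : List Int) (m x : Int) (t : List Int)
    (hm : PySem.List.min? cpu_ids (fun x => x) = some m)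
    (hs : PySem.List.sorted cpu_ids (fun x => x) false = x :: t) : m = x := by
  have hmin := PySem.List.min?_isMin hm
  have hmmem : m ∈ cpu_ids := PySem.List.min?_mem hm
  have hx : x ∈ cpu_ids := by
    have hx' : x ∈ PySem.List.sorted cpu_ids (fun x => x) false := by rw [hs]; simp
    exact (PySem.List.mem_sorted _ _ _ _).mp hx'
  exact le_antisymm (hmin x hx) (PySem.List.key_head_sorted_le _ _ hs m hmmem)

-- … and its last element is max's value.
theorem pv_max_last (cpu_ids : List Int) (m x : Int) (t : List Int)
    (hm : PySem.List.max? cpu_ids (fun x => x) = some m)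
    (hs : PySem.List.sorted cpu_ids (fun x => x) false = x :: t) :
    m = (x :: t).getLast (by simp) := by
  have hmax := PySem.List.max?_isMax hm
  have hmmem : m ∈ cpu_ids := PySem.List.max?_mem hm
  have hpw : (x :: t).Pairwise (fun p q : Int => p ≤ q) := by
    have hp := PySem.List.sorted_pairwise (xs := cpu_ids) (key := fun x => x)
    rw [hs] at hp; simpa using hp
  have hL : (x :: t).getLast (by simp) ∈ cpu_ids := by
    refine (PySem.List.mem_sorted cpu_ids (fun x => x) false _).mp ?_
    rw [hs]
    exact List.getLast_mem (by simp)
  have h1 : (x :: t).getLast (by simp) ≤ m := hmax _ hL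
  have hms : m ∈ x :: t := by
    have h' := (PySem.List.mem_sorted cpu_ids (fun x => x) false m).mpr hmmem
    rw [hs] at h'; exact h'
  have hlast : (x :: t).getLast (by simp) = (x :: t)[t.length]'(by simp) :=
    List.getLast_eq_getElem _
  have h2 : m ≤ (x :: t).getLast (by simp) := by
    rcases List.mem_iff_getElem.mp hms with ⟨k, hk, hke⟩
    rw [hlast]
    by_cases hkl : k = t.length
    · subst hkl; rw [← hke]; exact le_refl _
    · have := List.pairwise_iff_getElem.mp hpw k t.length
        hk (by simp) (by simp at hk; omega)
      rw [← hke]; exact this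
  exact le_antisymm h2 h1

theorem pv_pyGetD_last (x : Int) (t : List Int) :
    PySem.List.pyGetD (x :: t) (-1) 0 = (x :: t).getLast (by simp) := by
  have hlast : (x :: t).getLast (by simp) = (x :: t)[t.length]'(by simp) :=
    List.getLast_eq_getElem _
  rw [hlast]
  simp [PySem.List.pyGetD, PySem.List.pyGet?, PySem.List.pyIdx?]

-- ===== VERDICT (by name: the statement is the Claim_ definition above) =====
theorem format_cpu_range_spec : Claim_equal_format_cpu_range := by
  intro cpu_ids _
  unfold Spec_format_cpu_range format_cpu_range format_cpu_range_alt
  by_cases hnil : cpu_ids = []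
  · simp [hnil]
  by_cases h1 : cpu_ids.length = 1
  · simp [hnil, h1]
  simp only [hnil, h1, if_false]
  rcases hs : PySem.List.sorted cpu_ids (fun x => x) false with _ | ⟨x, t⟩
  · exact absurd ((PySem.List.sorted_eq_nil_iff _ _ _).mp hs) hnil
  rcases hmo : PySem.List.min? cpu_ids (fun x => x) with _ | mn
  · exact absurd ((PySem.List.min?_eq_none_iff _ _).mp hmo) hnil
  rcases hxo : PySem.List.max? cpu_ids (fun x => x) with _ | mx
  · exact absurd ((PySem.List.max?_eq_none_iff _ _).mp hxo) hnil
  have hmn : mn = x := pv_min_head cpu_ids mn x t hmo hs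
  have hmx : mx = (x :: t).getLast (by simp) := pv_max_last cpu_ids mx x t hxo hs
  have hpw : (x :: t).Pairwise (fun p q : Int => p ≤ q) := by
    have hp := PySem.List.sorted_pairwise (xs := cpu_ids) (key := fun x => x)
    rw [hs] at hp; simpa using hp
  have hmemiff : ∀ i : Int, cpu_ids.contains i = true ↔ i ∈ x :: t := by
    intro i
    rw [List.contains_iff_mem, ← hs, PySem.List.mem_sorted]
  simp only [Option.getD_some]
  have hcontig := pv_contig_iff x t hpw
  have hzip := pv_zip_all_iff_chain (x :: t)
  have hcond : ((PySem.List.pyRange mn (mx + 1) 1).all (fun i => cpu_ids.contains i) = true)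
      ↔ (((x :: t).zip ((x :: t).drop 1)).all (fun p => decide (p.2 - p.1 ≤ 1)) = true) := by
    constructor
    · intro hall
      refine hzip.mpr (hcontig.mp ?_)
      intro i hi1 hi2
      refine (hmemiff i).mp (List.all_eq_true.mp hall i ?_)
      rw [PySem.List.mem_pyRange_one]
      rw [hmn, hmx]; omega
    · intro hz
      have hmem := hcontig.mpr (hzip.mp hz)
      refine List.all_eq_true.mpr ?_
      intro i hi
      rw [PySem.List.mem_pyRange_one] at hi
      rw [hmn, hmx] at hi
      exact (hmemiff i).mpr (hmem i hi.1 (by omega))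
  have hhead : PySem.List.pyGetD (x :: t) 0 0 = x := by
    simp [PySem.List.pyGetD, PySem.List.pyGet?, PySem.List.pyIdx?]
  by_cases hz : ((x :: t).zip ((x :: t).drop 1)).all (fun p => decide (p.2 - p.1 ≤ 1)) = true
  · rw [if_pos (by rw [pyAllRangeMem_eq]; exact hcond.mpr hz), if_pos hz, hhead,
        pv_pyGetD_last, hmn, hmx]
  · rw [if_neg (fun hcA => hz (hcond.mp (by rw [← pyAllRangeMem_eq]; exact hcA))), if_neg hz]
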